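-- pv_equiv track=rewrite | github.com/sukritsingh/enspara | stag/cluster/utils.py | _partition_indices
-- ===== SOURCE A (Python) =====
-- def _partition_indices(indices, traj_lengths):
--     '''
--     Similar to _partition_list in function, this function uses
--     `traj_lengths` to determine which 2d trajectory-list index matches
--     the given 1d concatenated trajectory index for each index in
--     indices.
--     '''
--
--     partitioned_indices = []
--     for index in indices:
--         trj_index = 0
--         for traj_len in traj_lengths:
--             if traj_len > index:
--                 partitioned_indices.append((trj_index, index))
--                 break
--             else:
--                 index -= traj_len
--                 trj_index += 1
--
--     return partitioned_indices
-- ===== SOURCE B (Python) =====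
-- def _partition_indices(indices, traj_lengths):
--     # Prefix sums once, then a single forward sweep over the indices in
--     # ascending order (the matching trajectory slot is monotone in the
--     # index), reassembled into the original order at the end.
--     cum = []
--     total = 0
--     for length in traj_lengths:
--         total += length
--         cum.append(total)
--     n = len(indices)
--     found = {}
--     j = 0
--     for i in sorted(range(n), key=lambda i: indices[i]):
--         idx = indices[i]
--         while j < len(cum) and cum[j] <= idx:
--             j += 1
--         if j < len(cum):
--             found[i] = (j, idx - (cum[j - 1] if j > 0 else 0))
--     return [found[i] for i in range(n) if i in found]
-- ===== Notes on version B (the rewrite author's own statement) =====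
-- stated objective: faster
-- what changed: B precomputes the prefix sums of traj_lengths once and then resolves all indices with a single monotone two-pointer sweep over the indices in sorted order (reassembled into input order via a dict), instead of A's per-index subtract-and-rescan of traj_lengths.
import Mathlib
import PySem

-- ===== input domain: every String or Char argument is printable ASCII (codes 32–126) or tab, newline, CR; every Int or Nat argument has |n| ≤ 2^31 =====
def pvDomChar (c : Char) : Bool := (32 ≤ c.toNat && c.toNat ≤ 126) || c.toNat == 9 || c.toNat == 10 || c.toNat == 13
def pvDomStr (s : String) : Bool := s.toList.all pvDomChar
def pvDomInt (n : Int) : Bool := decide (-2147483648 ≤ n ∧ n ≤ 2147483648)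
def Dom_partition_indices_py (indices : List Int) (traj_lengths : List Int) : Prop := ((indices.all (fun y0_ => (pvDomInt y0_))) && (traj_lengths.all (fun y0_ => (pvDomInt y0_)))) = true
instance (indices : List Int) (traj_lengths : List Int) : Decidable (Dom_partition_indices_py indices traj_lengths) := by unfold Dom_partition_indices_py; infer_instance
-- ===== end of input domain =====

-- B replaces A's per-index rescan of traj_lengths by one prefix-sum pass plus a single
-- monotone sweep over the indices taken in sorted order (objective: faster).

-- ===== PORT A =====
-- inner 'for traj_len in traj_lengths' loop of A (break → return of the accumulator)
def pyA_loop (traj_lengths : List Int) (index : Int) (trj_index : Int)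
    (acc : List (List Int)) : List (List Int) :=
  match traj_lengths with
  | [] => acc
  | traj_len :: rest =>
    if traj_len > index then acc ++ [[trj_index, index]]
    else pyA_loop rest (index - traj_len) (trj_index + 1) acc

def partition_indices_py (indices : List Int) (traj_lengths : List Int) : List (List Int) :=
  indices.foldl (fun acc index => pyA_loop traj_lengths index 0 acc) []

-- ===== PORT B =====
-- 'for length in traj_lengths: total += length; cum.append(total)'
def pyB_cum (traj_lengths : List Int) : List Int :=
  (traj_lengths.foldl (fun (st : Int × List Int) length => (st.1 + length, st.2 ++ [st.1 + length])) (0, [])).2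

-- 'while j < len(cum) and cum[j] <= idx: j += 1'  (j only ever increments from 0, so a Nat counter)
def pyB_while (cum : List Int) (j : Nat) (idx : Int) : Nat :=
  if h : j < cum.length then
    if cum[j] ≤ idx then pyB_while cum (j + 1) idx else j
  else j
termination_by cum.length - j

def partition_indices_py_alt (indices : List Int) (traj_lengths : List Int) : List (List Int) :=
  let cum := pyB_cum traj_lengths
  let n : Int := indices.length
  -- sorted(range(n), key=lambda i: indices[i]); i is always in range, so indices[i] is pyGetD
  let order := PySem.List.sorted (PySem.List.pyRange 0 n 1) (fun i => PySem.List.pyGetD indices i 0) false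
  let st := order.foldl
    (fun (st : Nat × PySem.Dict Int (List Int)) i =>
      let idx := PySem.List.pyGetD indices i 0
      let j := pyB_while cum st.1 idx
      -- 'cum[j-1] if j > 0 else 0': j-1 is in range there, so List.getD is exact
      (j, if j < cum.length then st.2.insert i [(j : Int), idx - (if 0 < j then cum.getD (j - 1) 0 else 0)] else st.2))
    (0, PySem.Dict.empty)
  (PySem.List.pyRange 0 n 1).filterMap (fun i => st.2.get? i)

-- ===== PRECONDITION & SPEC =====
def Spec_partition_indices_py (indices : List Int) (traj_lengths : List Int) (out : List (List Int)) : Prop := out = partition_indices_py_alt indices traj_lengths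
instance (indices : List Int) (traj_lengths : List Int) (out : List (List Int)) : Decidable (Spec_partition_indices_py indices traj_lengths out) := by unfold Spec_partition_indices_py; infer_instance

-- ===== CLAIM (what is proved, stated in full; the proofs are below) =====
def Claim_equal_partition_indices_py : Prop := ∀ (indices : List Int) (traj_lengths : List Int), Dom_partition_indices_py indices traj_lengths → Spec_partition_indices_py indices traj_lengths (partition_indices_py indices traj_lengths)

-- ===== LEMMAS AND PROOFS =====

-- running prefix sums of ls, starting from total t
def cumList (t : Int) (ls : List Int) : List Int :=
  match ls with
  | [] => []
  | L :: r => (t + L) :: cumList (t + L) r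

-- A's inner loop as an Option: the appended pair, if any
def hitA (ls : List Int) (index : Int) (trj : Int) : Option (List Int) :=
  match ls with
  | [] => none
  | L :: r => if L > index then some [trj, index] else hitA r (index - L) (trj + 1)

-- B's per-index result, computed with the pointer started at 0
def gB (cum : List Int) (idx : Int) : Option (List Int) :=
  let j := pyB_while cum 0 idx
  if j < cum.length then some [(j : Int), idx - (if 0 < j then cum.getD (j - 1) 0 else 0)] else none

lemma pyA_loop_eq (ls : List Int) : ∀ (index trj : Int) (acc : List (List Int)),
    pyA_loop ls index trj acc = acc ++ (hitA ls index trj).toList := by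
  induction ls with
  | nil => intro index trj acc; simp [pyA_loop, hitA]
  | cons L r ih =>
    intro index trj acc
    simp only [pyA_loop, hitA]
    split
    · simp
    · exact ih _ _ _

lemma foldl_toList_eq_filterMap (f : Int → Option (List Int)) (xs : List Int) :
    ∀ acc, xs.foldl (fun acc x => acc ++ (f x).toList) acc = acc ++ xs.filterMap f := by
  induction xs with
  | nil => intro acc; simp
  | cons x xs ih =>
    intro acc
    simp only [List.foldl_cons, List.filterMap_cons]
    rw [ih]
    cases f x <;> simp

lemma pyB_cum_eq (ls : List Int) : pyB_cum ls = cumList 0 ls := by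
  have h : ∀ (ls : List Int) (t : Int) (acc : List Int),
      (ls.foldl (fun (st : Int × List Int) length => (st.1 + length, st.2 ++ [st.1 + length])) (t, acc)).2
        = acc ++ cumList t ls := by
    intro ls
    induction ls with
    | nil => intro t acc; simp [cumList]
    | cons L r ih => intro t acc; simp only [List.foldl_cons, cumList]; rw [ih]; simp
  simpa using h ls 0 []

lemma pyB_while_le (cum : List Int) (j : Nat) (idx : Int) :
    j ≤ cum.length → pyB_while cum j idx ≤ cum.length := by
  fun_induction pyB_while cum j idx with
  | case1 j h hle ih => intro _; exact ih (by omega)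
  | case2 j h hle => intro _; omega
  | case3 j h => intro hj; exact hj

lemma pyB_while_below (cum : List Int) (j : Nat) (idx : Int) :
    ∀ j' (h' : j' < cum.length), j ≤ j' → j' < pyB_while cum j idx → cum[j'] ≤ idx := by
  fun_induction pyB_while cum j idx with
  | case1 j h hle ih =>
    intro j' h' hge hlt
    by_cases hj : j' = j
    · subst hj; exact hle
    · exact ih j' h' (by omega) hlt
  | case2 j h hle => intro j' h' hge hlt; omega
  | case3 j h => intro j' h' hge hlt; omega

lemma pyB_while_step (cum : List Int) (idx : Int) (j : Nat) (h : j < cum.length) (hle : cum[j] ≤ idx) :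
    pyB_while cum j idx = pyB_while cum (j + 1) idx := by
  rw [pyB_while]; simp [h, hle]

lemma pyB_while_eq_zero (cum : List Int) (idx : Int) (j : Nat) (hj : j ≤ cum.length)
    (hbelow : ∀ j' (h : j' < cum.length), j' < j → cum[j'] ≤ idx) :
    pyB_while cum j idx = pyB_while cum 0 idx := by
  induction j with
  | zero => rfl
  | succ b ih =>
    have hb : b < cum.length := by omega
    rw [← pyB_while_step cum idx b hb (hbelow b hb (by omega))]
    exact ih (by omega) (fun j' h hj' => hbelow j' h (by omega))

-- shift: walking c :: cs from j+1 is walking cs from j, one higher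
lemma pyB_while_cons_succ (c : Int) (cs : List Int) (idx : Int) (j : Nat) :
    pyB_while (c :: cs) (j + 1) idx = pyB_while cs j idx + 1 := by
  fun_induction pyB_while cs j idx with
  | case1 j h hle ih =>
    rw [pyB_while.eq_def]
    have h1 : j + 1 < (c :: cs).length := by simp; omega
    simp only [h1, dif_pos, List.getElem_cons_succ, hle, if_pos]
    exact ih
  | case2 j h hle =>
    rw [pyB_while.eq_def]
    simp only [List.length_cons, List.getElem_cons_succ]
    rw [dif_pos (by omega), if_neg hle]
  | case3 j h =>
    rw [pyB_while.eq_def]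
    simp only [List.length_cons]
    rw [dif_neg (by omega)]

-- the heart of the A↔B link: A's subtract-and-scan equals B's prefix-sum lookup
lemma hitA_eq_gB_aux (ls : List Int) : ∀ (t idx trj : Int),
    hitA ls (idx - t) trj =
      (if pyB_while (cumList t ls) 0 idx < (cumList t ls).length then
        some [trj + (pyB_while (cumList t ls) 0 idx : Int),
              idx - (if 0 < pyB_while (cumList t ls) 0 idx then
                       (cumList t ls).getD (pyB_while (cumList t ls) 0 idx - 1) 0 else t)]
      else none) := by
  induction ls with
  | nil =>
    intro t idx trj
    simp [hitA, cumList, pyB_while]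
  | cons L r ih =>
    intro t idx trj
    simp only [hitA, cumList]
    have hW : pyB_while ((t + L) :: cumList (t + L) r) 0 idx
        = if (t + L) ≤ idx then pyB_while (cumList (t + L) r) 0 idx + 1 else 0 := by
      rw [pyB_while.eq_def]
      simp only [List.length_cons, List.getElem_cons_zero]
      rw [dif_pos (by omega)]
      split
      · rw [pyB_while_cons_succ]
      · rfl
    by_cases hc : (t + L) ≤ idx
    · -- this trajectory is consumed: recurse with the larger base
      have hLidx : ¬ (L > idx - t) := by omega
      rw [if_neg hLidx]
      have h2 : idx - t - L = idx - (t + L) := by ring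
      rw [h2, ih (t + L) idx (trj + 1), hW, if_pos hc]
      generalize pyB_while (cumList (t + L) r) 0 idx = W
      simp only [List.length_cons]
      by_cases hlen : W < (cumList (t + L) r).length
      · rw [if_pos hlen, if_pos (by omega : W + 1 < (cumList (t + L) r).length + 1),
            if_pos (by omega : 0 < W + 1)]
        cases W with
        | zero =>
          rw [if_neg (lt_irrefl 0)]
          simp only [Nat.add_sub_cancel, List.getD_cons_zero, Option.some_inj, List.cons.injEq]
          refine ⟨by push_cast; ring, by simp⟩
        | succ k =>
          rw [if_pos (by omega : 0 < k + 1)]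
          simp only [Nat.add_sub_cancel, List.getD_cons_succ, Option.some_inj, List.cons.injEq]
          refine ⟨by push_cast; ring, by simp⟩
      · rw [if_neg hlen, if_neg (by omega)]
    · -- first trajectory already exceeds idx: hit at slot 0
      have hLidx : L > idx - t := by omega
      rw [if_pos hLidx, hW, if_neg hc]
      simp

lemma hitA_eq_gB (ls : List Int) (idx : Int) : hitA ls idx 0 = gB (cumList 0 ls) idx := by
  have h := hitA_eq_gB_aux ls 0 idx 0
  simp only [sub_zero] at h
  rw [h, gB]
  simp

-- two-pointer sweep over a sorted, duplicate-free batch computes gB for every member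
lemma sweep (cum : List Int) (indices : List Int) :
    ∀ (rest : List Int) (j : Nat) (d : PySem.Dict Int (List Int)),
    rest.Nodup →
    rest.Pairwise (fun a b => PySem.List.pyGetD indices a 0 ≤ PySem.List.pyGetD indices b 0) →
    j ≤ cum.length →
    (∀ j' (h' : j' < cum.length), j' < j → ∀ i ∈ rest, cum[j'] ≤ PySem.List.pyGetD indices i 0) →
    (∀ i ∈ rest, d.get? i = none) →
    ∀ x, ((rest.foldl
        (fun (st : Nat × PySem.Dict Int (List Int)) i =>
          (pyB_while cum st.1 (PySem.List.pyGetD indices i 0),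
           if pyB_while cum st.1 (PySem.List.pyGetD indices i 0) < cum.length then
             st.2.insert i [(pyB_while cum st.1 (PySem.List.pyGetD indices i 0) : Int),
               PySem.List.pyGetD indices i 0 -
                 (if 0 < pyB_while cum st.1 (PySem.List.pyGetD indices i 0) then
                   cum.getD (pyB_while cum st.1 (PySem.List.pyGetD indices i 0) - 1) 0 else 0)]
           else st.2))
        (j, d)).2).get? x
      = if x ∈ rest then gB cum (PySem.List.pyGetD indices x 0) else d.get? x := by
  intro rest
  induction rest with
  | nil => intro j d _ _ _ _ _ x; simp
  | cons i rest ih =>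
    intro j d hnd hpw hj hbelow hnone x
    simp only [List.foldl_cons]
    have hkey : ∀ i' ∈ rest, PySem.List.pyGetD indices i 0 ≤ PySem.List.pyGetD indices i' 0 :=
      fun i' hi' => (List.pairwise_cons.mp hpw).1 i' hi'
    set idx := PySem.List.pyGetD indices i 0 with hidx
    have hzero : pyB_while cum j idx = pyB_while cum 0 idx :=
      pyB_while_eq_zero cum idx j hj
        (fun j' h' hj' => hbelow j' h' hj' i (List.mem_cons_self ..))
    set j1 := pyB_while cum j idx with hj1
    have hj1le : j1 ≤ cum.length := pyB_while_le cum j idx hj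
    have hbelow1 : ∀ j' (h' : j' < cum.length), j' < j1 → cum[j'] ≤ idx := by
      intro j' h' hlt
      by_cases hcase : j' < j
      · exact hbelow j' h' hcase i (List.mem_cons_self ..)
      · exact pyB_while_below cum j idx j' h' (by omega) hlt
    have hbelow' : ∀ j' (h' : j' < cum.length), j' < j1 →
        ∀ i' ∈ rest, cum[j'] ≤ PySem.List.pyGetD indices i' 0 := by
      intro j' h' hlt i' hi'
      exact le_trans (hbelow1 j' h' hlt) (hkey i' hi')
    have hgB : gB cum idx =
        (if j1 < cum.length then some [(j1 : Int), idx - (if 0 < j1 then cum.getD (j1 - 1) 0 else 0)] else none) := by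
      rw [gB, ← hzero]
    by_cases hlen : j1 < cum.length
    · -- a slot was found: i is inserted
      rw [if_pos hlen] at hgB
      simp only [if_pos hlen]
      rw [ih j1 _ (List.nodup_cons.mp hnd).2 (List.pairwise_cons.mp hpw).2 hj1le hbelow'
        (fun i' hi' => by
          have hne : i' ≠ i := fun he => (List.nodup_cons.mp hnd).1 (he ▸ hi')
          rw [PySem.Dict.get?_insert_of_ne _ _ hne]
          exact hnone i' (List.mem_cons_of_mem _ hi'))]
      by_cases hx : x ∈ rest
      · rw [if_pos hx, if_pos (List.mem_cons_of_mem _ hx)]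
      · rw [if_neg hx]
        by_cases hxi : x = i
        · subst hxi
          rw [if_pos (List.mem_cons_self ..), PySem.Dict.get?_insert_self, hgB]
        · rw [PySem.Dict.get?_insert_of_ne _ _ hxi,
            if_neg (by simp [hx, hxi])]
    · -- no slot: i is skipped, and gB is none there too
      rw [if_neg hlen] at hgB
      simp only [if_neg hlen]
      rw [ih j1 _ (List.nodup_cons.mp hnd).2 (List.pairwise_cons.mp hpw).2 hj1le hbelow'
        (fun i' hi' => hnone i' (List.mem_cons_of_mem _ hi'))]
      by_cases hx : x ∈ rest
      · rw [if_pos hx, if_pos (List.mem_cons_of_mem _ hx)]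
      · rw [if_neg hx]
        by_cases hxi : x = i
        · subst hxi
          rw [if_pos (List.mem_cons_self ..), hgB, hnone _ (List.mem_cons_self ..)]
        · rw [if_neg (by simp [hx, hxi])]

-- ===== VERDICT (by name: the statement is the Claim_ definition above) =====
theorem partition_indices_py_spec : Claim_equal_partition_indices_py := by
  intro indices traj_lengths _
  unfold Spec_partition_indices_py
  have hA : partition_indices_py indices traj_lengths
      = indices.filterMap (fun idx => hitA traj_lengths idx 0) := by
    rw [partition_indices_py]
    simp only [pyA_loop_eq]
    rw [foldl_toList_eq_filterMap]
    simp
  have hB : partition_indices_py_alt indices traj_lengths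
      = indices.filterMap (gB (pyB_cum traj_lengths)) := by
    rw [partition_indices_py_alt]
    simp only []
    set cum := pyB_cum traj_lengths with hcum
    set order := PySem.List.sorted (PySem.List.pyRange 0 (indices.length : Int) 1)
        (fun i => PySem.List.pyGetD indices i 0) false with horder
    have hperm : order.Perm (PySem.List.pyRange 0 (indices.length : Int) 1) :=
      PySem.List.sorted_perm ..
    have hnd : order.Nodup := hperm.nodup_iff.mpr (PySem.List.nodup_pyRange_one ..)
    have hsw := sweep cum indices order 0 PySem.Dict.empty hnd
      (PySem.List.sorted_pairwise ..)
      (by omega)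
      (by intro j' h' hj' i hi; omega)
      (by intro i _; exact PySem.Dict.get?_empty ..)
    rw [List.filterMap_congr (fun i hi => by
      rw [hsw i, if_pos (hperm.mem_iff.mpr hi)])]
    have hmap : (PySem.List.pyRange 0 (indices.length : Int) 1).map
        (fun i => PySem.List.pyGetD indices i 0) = indices :=
      PySem.List.map_pyGetD_pyRange_zero' ..
    conv_rhs => rw [← hmap]
    rw [List.filterMap_map]
    rfl
  rw [hA, hB]
  exact List.filterMap_congr (fun idx _ => by rw [hitA_eq_gB, pyB_cum_eq])
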